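-- pv_equiv track=rewrite | github.com/miberl/python-shell | src/interactive_input/autocompleter.py | get_path_with_no_last_word
-- ===== SOURCE A (Python) =====
-- def get_path_with_no_last_word(path):
--     # example: /home/user -> /home/
--     if "/" in path:
--         dirs = path.split("/")
--         complete_dir = ""
--         for i in range(0, len(dirs) - 1):
--             complete_dir += dirs[i] + "/"
--         return complete_dir
--     else:
--         return path
-- ===== SOURCE B (Python) =====
-- def get_path_with_no_last_word(path):
--     # example: /home/user -> /home/
--     if "/" in path:
--         return path[: path.rfind("/") + 1]
--     else:
--         return path
-- ===== Notes on version B (the rewrite author's own statement) =====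
-- stated objective: simpler
-- what changed: Instead of splitting the path into tokens and rebuilding all but the last with a concatenation loop, B locates the final separator with rfind and returns the slice up to and including it.
import Mathlib
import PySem

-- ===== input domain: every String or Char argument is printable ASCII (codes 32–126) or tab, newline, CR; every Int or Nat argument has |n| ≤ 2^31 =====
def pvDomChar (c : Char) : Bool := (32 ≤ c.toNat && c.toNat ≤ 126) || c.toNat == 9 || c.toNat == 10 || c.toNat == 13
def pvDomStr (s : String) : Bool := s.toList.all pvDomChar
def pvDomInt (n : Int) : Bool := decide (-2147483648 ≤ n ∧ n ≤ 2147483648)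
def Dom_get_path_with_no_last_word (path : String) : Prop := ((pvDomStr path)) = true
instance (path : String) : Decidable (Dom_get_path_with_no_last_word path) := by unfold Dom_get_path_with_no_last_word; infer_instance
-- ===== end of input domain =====

-- B replaces A's split-into-tokens-and-rebuild loop with a single rfind and a slice (simpler).

-- ===== PORT A =====
def get_path_with_no_last_word (path : String) : String :=
  if PySem.Str.isIn "/" path then
    match PySem.Chars.split? path.toList ['/'] with
    | some dirs =>
        String.ofList
          ((PySem.List.pyRange 0 ((dirs.length : Int) - 1)).foldl
            (fun acc i => acc ++ (PySem.List.pyGetD dirs i [] ++ ['/'])) ([] : List Char))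
    | none => path  -- unreachable: the separator "/" is nonempty
  else path

-- ===== PORT B =====
def get_path_with_no_last_word_alt (path : String) : String :=
  if PySem.Str.isIn "/" path then
    PySem.Str.slice path none (some (PySem.Str.rfind path "/" + 1))
  else path

-- ===== PRECONDITION & SPEC =====
def Spec_get_path_with_no_last_word (path : String) (out : String) : Prop := out = get_path_with_no_last_word_alt path
instance (path : String) (out : String) : Decidable (Spec_get_path_with_no_last_word path out) := by unfold Spec_get_path_with_no_last_word; infer_instance

-- ===== CLAIM (what is proved, stated in full; the proofs are below) =====
def Claim_equal_get_path_with_no_last_word : Prop := ∀ (path : String), Dom_get_path_with_no_last_word path → Spec_get_path_with_no_last_word path (get_path_with_no_last_word path)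

-- ===== LEMMAS AND PROOFS =====

-- A simple structural model of Python's s.split("/") on char lists.
def splitS : List Char → List (List Char)
  | [] => [[]]
  | c :: t =>
    if c = '/' then [] :: splitS t
    else
      match splitS t with
      | [] => [[c]]      -- unreachable: splitS never returns []
      | h :: tl => (c :: h) :: tl

-- Index of the LAST '/' in the list, -1 if none (the value of path.rfind("/")).
def lastIdx : List Char → Int
  | [] => -1
  | c :: t => if 0 ≤ lastIdx t then lastIdx t + 1 else if c = '/' then 0 else -1

def prependFirst (p : List Char) : List (List Char) → List (List Char)
  | [] => [p]
  | h :: tl => (p ++ h) :: tl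

theorem splitS_ne_nil (l : List Char) : splitS l ≠ [] := by
  cases l with
  | nil => simp [splitS]
  | cons c t =>
    simp only [splitS]
    split
    · simp
    · split <;> simp_all

theorem splitS_no_slash (l : List Char) (h : '/' ∉ l) : splitS l = [l] := by
  induction l with
  | nil => rfl
  | cons c t ih =>
    simp only [List.mem_cons, not_or] at h
    have hc : ¬ c = '/' := fun hcc => h.1 hcc.symm
    simp [splitS, hc, ih h.2]

theorem splitS_two_le (l : List Char) (h : '/' ∈ l) : 2 ≤ (splitS l).length := by
  induction l with
  | nil => simp at h
  | cons c t ih =>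
    by_cases hc : c = '/'
    · simp only [splitS, if_pos hc, List.length_cons]
      have h1 : 0 < (splitS t).length := List.length_pos_of_ne_nil (splitS_ne_nil t)
      omega
    · have ht : '/' ∈ t := by simp [hc] at h; tauto
      have h2 := ih ht
      simp only [splitS, if_neg hc]
      cases hs : splitS t with
      | nil => exact absurd hs (splitS_ne_nil t)
      | cons a b => rw [hs] at h2; simpa using h2

theorem splitOn_go_eq (fuel : Nat) : ∀ (l cur : List Char) (acc : List (List Char)),
    l.length ≤ fuel →
    PySem.Chars.splitOn.go ['/'] fuel l cur acc = acc.reverse ++ prependFirst cur.reverse (splitS l) := by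
  induction fuel with
  | zero =>
    intro l cur acc h
    have : l = [] := List.eq_nil_of_length_eq_zero (by omega)
    subst this
    simp [PySem.Chars.splitOn.go, splitS, prependFirst]
  | succ n ih =>
    intro l cur acc h
    cases l with
    | nil => simp [PySem.Chars.splitOn.go, splitS, prependFirst]
    | cons c rest =>
      by_cases hc : c = '/'
      · subst hc
        have hpref : List.isPrefixOf ['/'] ('/' :: rest) = true := by
          simp [List.isPrefixOf]
        simp only [PySem.Chars.splitOn.go, hpref, if_pos, List.length_cons, List.length_nil,
          List.drop_succ_cons, List.drop_zero]
        rw [ih rest [] (cur.reverse :: acc) (by simpa using Nat.le_of_succ_le_succ h)]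
        have hne := splitS_ne_nil rest
        cases hs : splitS rest with
        | nil => exact absurd hs hne
        | cons a b =>
          simp [splitS, prependFirst, hs]
      · have hpref : List.isPrefixOf ['/'] (c :: rest) = false := by
          simp [List.isPrefixOf, hc]
          intro hcc; exact hc hcc.symm
        simp only [PySem.Chars.splitOn.go, hpref]
        rw [if_neg (by simp)]
        rw [ih rest (c :: cur) acc (by simpa using Nat.le_of_succ_le_succ h)]
        have hne := splitS_ne_nil rest
        cases hs : splitS rest with
        | nil => exact absurd hs hne
        | cons a b =>
          simp [splitS, hc, prependFirst, hs]
 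
theorem splitOn_eq_splitS (l : List Char) : PySem.Chars.splitOn l ['/'] = splitS l := by
  unfold PySem.Chars.splitOn
  rw [splitOn_go_eq (l.length + 1) l [] [] (by omega)]
  have hne := splitS_ne_nil l
  cases hs : splitS l with
  | nil => exact absurd hs hne
  | cons a b => simp [prependFirst]

theorem lastIdx_neg_one (l : List Char) (h : '/' ∉ l) : lastIdx l = -1 := by
  induction l with
  | nil => rfl
  | cons c t ih =>
    simp only [List.mem_cons, not_or] at h
    have hc : ¬ c = '/' := fun hcc => h.1 hcc.symm
    simp [lastIdx, ih h.2, hc]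

theorem lastIdx_nonneg (l : List Char) (h : '/' ∈ l) : 0 ≤ lastIdx l := by
  induction l with
  | nil => simp at h
  | cons c t ih =>
    by_cases hc : c = '/'
    · simp only [lastIdx]; split_ifs <;> omega
    · have ht : '/' ∈ t := by simp [hc] at h; tauto
      have := ih ht
      simp only [lastIdx]; split_ifs <;> omega

theorem lastIdx_append_singleton (xs : List Char) (c : Char) :
    lastIdx (xs ++ [c]) = if c = '/' then (xs.length : Int) else lastIdx xs := by
  induction xs with
  | nil => simp [lastIdx]
  | cons x t ih =>
    simp only [List.cons_append, lastIdx, ih, List.length_cons]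
    by_cases hc : c = '/'
    · simp only [if_pos hc]
      rw [if_pos (by positivity)]
      push_cast; ring
    · simp only [if_neg hc]

theorem rfind_go_eq (s : List Char) : ∀ (j : Nat),
    PySem.Chars.rfind.go s ['/'] j = lastIdx (s.take (j + 1)) := by
  intro j
  induction j with
  | zero =>
    cases s with
    | nil => simp [PySem.Chars.rfind.go, List.isPrefixOf, lastIdx]
    | cons c t =>
      simp only [PySem.Chars.rfind.go, List.take_succ, List.take_zero, List.nil_append]
      by_cases hc : c = '/'
      · subst hc; simp [List.isPrefixOf, lastIdx]
      · have : List.isPrefixOf ['/'] (c :: t) = false := by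
          simp [List.isPrefixOf]; intro hcc; exact hc hcc.symm
        simp [PySem.Chars.rfind.go, this, lastIdx, hc]
  | succ j ih =>
    simp only [PySem.Chars.rfind.go, ih]
    cases hd : (s.drop (j + 1)) with
    | nil =>
      have hlen : s.length ≤ j + 1 := by
        by_contra hlt
        have : s.drop (j + 1) ≠ [] := by
          apply List.ne_nil_of_length_pos
          simp; omega
        exact this hd
      rw [if_neg (by simp [List.isPrefixOf])]
      rw [List.take_of_length_le (by omega), List.take_of_length_le (by omega)]
    | cons c r =>
      have hget : s[j + 1]? = some c := by
        rw [← List.head?_drop, hd]; rfl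
      have hlt : j + 1 < s.length := by
        by_contra hge
        rw [List.getElem?_eq_none (by omega)] at hget
        simp at hget
      have htake : s.take (j + 2) = s.take (j + 1) ++ [c] := by
        rw [List.take_add_one, hget]; rfl
      rw [htake, lastIdx_append_singleton]
      rw [List.length_take_of_le (by omega)]
      by_cases hc : c = '/'
      · subst hc
        rw [if_pos (by simp [List.isPrefixOf, hd]), if_pos rfl]
      · rw [if_neg (by simp [List.isPrefixOf, hd]; intro hcc; exact hc hcc.symm), if_neg hc]

theorem rfind_eq_lastIdx (l : List Char) : PySem.Chars.rfind l ['/'] = lastIdx l := by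
  unfold PySem.Chars.rfind
  cases l with
  | nil => simp [PySem.Chars.rfind.go, List.isPrefixOf, lastIdx]
  | cons c t =>
    rw [rfind_go_eq]
    rw [List.take_of_length_le (by simp)]

-- The A-side loop body, expressed on the token list: flatten of "token ++ '/'":
theorem flatMap_range_getD (dirs : List (List Char)) (n : Nat) (hn : n ≤ dirs.length) :
    (List.range n).flatMap (fun k => dirs.getD k [] ++ ['/'])
      = (dirs.take n).flatMap (fun d => d ++ ['/']) := by
  induction n with
  | zero => simp
  | succ m ih =>
    rw [List.range_succ, List.flatMap_append, ih (by omega)]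
    have : dirs.take (m + 1) = dirs.take m ++ [dirs[m]] := List.take_succ_eq_append_getElem (by omega)
    rw [this, List.flatMap_append]
    simp only [List.flatMap_cons, List.flatMap_nil, List.append_nil,
      List.getD, List.getElem?_eq_getElem (by omega : m < dirs.length), Option.getD_some]
    rfl

-- The heart of the equivalence: rebuilding all tokens but the last (with '/' after each)
-- is the prefix of the input up to and including the last '/'.
theorem main_eq (l : List Char) (h : '/' ∈ l) :
    ((splitS l).dropLast).flatMap (fun d => d ++ ['/']) = l.take ((lastIdx l).toNat + 1) := by
  induction l with
  | nil => simp at h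
  | cons c t ih =>
    by_cases hc : c = '/'
    · subst hc
      rw [show splitS ('/' :: t) = [] :: splitS t from by simp [splitS]]
      rw [List.dropLast_cons_of_ne_nil (splitS_ne_nil t)]
      by_cases ht : '/' ∈ t
      · have h0 := lastIdx_nonneg t ht
        simp only [List.flatMap_cons, List.nil_append, ih ht]
        have h1 : lastIdx ('/' :: t) = lastIdx t + 1 := by
          simp only [lastIdx]; rw [if_pos h0]
        rw [h1]
        have h2 : (lastIdx t + 1).toNat + 1 = ((lastIdx t).toNat + 1) + 1 := by omega
        rw [h2, List.take_succ_cons]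
        rfl
      · rw [splitS_no_slash t ht]
        have h1 : lastIdx ('/' :: t) = 0 := by
          simp [lastIdx, lastIdx_neg_one t ht]
        rw [h1]
        simp
    · have ht : '/' ∈ t := by simp [hc] at h; tauto
      have h2 := splitS_two_le t ht
      have h0 := lastIdx_nonneg t ht
      simp only [splitS, if_neg hc]
      cases hs : splitS t with
      | nil => exact absurd hs (splitS_ne_nil t)
      | cons a b =>
        have hb : b ≠ [] := by
          rw [hs] at h2; simp at h2
          intro hb; subst hb; simp at h2
        rw [List.dropLast_cons_of_ne_nil hb, List.flatMap_cons]
        rw [hs, List.dropLast_cons_of_ne_nil hb, List.flatMap_cons] at ih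
        have h1 : lastIdx (c :: t) = lastIdx t + 1 := by
          simp only [lastIdx]; rw [if_pos h0]
        rw [h1]
        have h3 : (lastIdx t + 1).toNat + 1 = ((lastIdx t).toNat + 1) + 1 := by omega
        rw [h3, List.take_succ_cons]
        simp only [List.cons_append]
        rw [ih ht]

-- ===== VERDICT (by name: the statement is the Claim_ definition above) =====
theorem get_path_with_no_last_word_spec : Claim_equal_get_path_with_no_last_word := by
  intro path _
  unfold Spec_get_path_with_no_last_word
  unfold get_path_with_no_last_word get_path_with_no_last_word_alt
  by_cases hin : PySem.Str.isIn "/" path = true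
  · rw [if_pos hin, if_pos hin]
    have hmem : '/' ∈ path.toList := by
      have := (PySem.Str.isIn_iff_infix "/" path).mp hin
      simpa [List.singleton_infix_iff] using this
    have hsplit : PySem.Chars.split? path.toList ['/'] = some (splitS path.toList) := by
      simp [PySem.Chars.split?, splitOn_eq_splitS]
    rw [hsplit]
    show String.ofList _ = _
    set dirs := splitS path.toList with hdirs
    have hlen : 1 ≤ dirs.length := List.length_pos_of_ne_nil (hdirs ▸ splitS_ne_nil path.toList)
    -- reduce the A-side loop to a flatMap over the tokens but the last
    have hcast : ((dirs.length : Int) - 1) = ((dirs.length - 1 : Nat) : Int) := by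
      push_cast [hlen]; omega
    have hA : (PySem.List.pyRange 0 ((dirs.length : Int) - 1)).foldl
        (fun acc i => acc ++ (PySem.List.pyGetD dirs i [] ++ ['/'])) ([] : List Char)
        = (dirs.dropLast).flatMap (fun d => d ++ ['/']) := by
      rw [PySem.List.foldl_append_eq_flatMap, List.nil_append, hcast,
        PySem.List.pyRange_zero_natCast, List.flatMap_map]
      simp only [PySem.List.pyGetD_natCast]
      rw [flatMap_range_getD dirs (dirs.length - 1) (by omega)]
      rw [List.dropLast_eq_take]
    -- the B side is the take up to the last '/'
    have hrf : PySem.Str.rfind path "/" = lastIdx path.toList := by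
      rw [PySem.Str.rfind_eq]
      have : ("/" : String).toList = ['/'] := rfl
      rw [this, rfind_eq_lastIdx]
    have h0 : 0 ≤ lastIdx path.toList := lastIdx_nonneg _ hmem
    apply String.toList_inj.mp
    rw [String.toList_ofList, PySem.Str.toList_slice, PySem.Chars.slice_eq_listSlice]
    rw [hrf, PySem.List.slice_to path.toList (show (0:Int) ≤ lastIdx path.toList + 1 by omega)]
    have htn : (lastIdx path.toList + 1).toNat = (lastIdx path.toList).toNat + 1 := by omega
    rw [htn, hA, hdirs]
    exact main_eq path.toList hmem
  · rw [if_neg hin, if_neg hin]
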